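-- pv_equiv track=rewrite | github.com/RKobyshev/INF | 1-2weeks/N2_8.py | ismed
-- ===== SOURCE A (Python) =====
-- def ismed(n, a):
--     nm = 0
--     nb = 0
--     for i in a:
--         if i<n:nm+=1
--         if i>n:nb+=1
--     if nm==nb:return True
--     else:return False
-- ===== SOURCE B (Python) =====
-- def _count_below(s, pred):
--     # length of the maximal prefix of sorted list s whose elements satisfy pred
--     # (pred is downward-closed along the sorted order), found by binary search
--     lo = 0
--     hi = len(s)
--     while lo < hi:
--         mid = (lo + hi) // 2
--         if pred(s[mid]):
--             lo = mid + 1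
--         else:
--             hi = mid
--     return lo
--
-- def ismed(n, a):
--     s = sorted(a)
--     below = _count_below(s, lambda x: x < n)
--     not_above = _count_below(s, lambda x: x <= n)
--     return below == len(s) - not_above
-- ===== Notes on version B (the rewrite author's own statement) =====
-- stated objective: alternative
-- what changed: Replaces A's single counting scan with sort-then-binary-search: B sorts a copy of the list and finds the counts of elements strictly below and strictly above n as two hand-written bisect queries on the sorted array.
import Mathlib
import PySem

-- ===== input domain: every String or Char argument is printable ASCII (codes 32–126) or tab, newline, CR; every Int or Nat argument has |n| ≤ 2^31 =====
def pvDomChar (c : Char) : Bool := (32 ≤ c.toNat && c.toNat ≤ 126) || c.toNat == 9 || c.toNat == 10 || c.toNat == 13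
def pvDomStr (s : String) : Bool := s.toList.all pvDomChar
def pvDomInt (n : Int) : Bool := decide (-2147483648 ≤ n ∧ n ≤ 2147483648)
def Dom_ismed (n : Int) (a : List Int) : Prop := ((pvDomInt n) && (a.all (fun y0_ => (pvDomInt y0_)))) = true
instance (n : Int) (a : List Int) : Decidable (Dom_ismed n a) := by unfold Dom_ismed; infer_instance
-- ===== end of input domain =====

-- B replaces A's counting scan by sort + two hand-written binary searches (return value only; neither mutates its input).

-- ===== PORT A =====
def ismed (n : Int) (a : List Int) : Bool :=
  let st := a.foldl (fun (st : Int × Int) i =>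
      let st1 := if i < n then (st.1 + 1, st.2) else st
      if i > n then (st1.1, st1.2 + 1) else st1) (0, 0)
  if st.1 = st.2 then true else false

-- ===== PORT B =====
-- while lo < hi: mid = (lo+hi)//2; if pred(s[mid]): lo = mid+1 else: hi = mid
def countBelowGo (pred : Int → Bool) (s : List Int) (lo hi : Nat) : Nat :=
  if h : lo < hi then
    let mid := (lo + hi) / 2
    if pred (s.getD mid 0) then countBelowGo pred s (mid + 1) hi
    else countBelowGo pred s lo mid
  else lo
termination_by hi - lo
decreasing_by
  · have h1 : (lo + hi) / 2 < hi := by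
      have := Nat.div_lt_iff_lt_mul (k := 2) (by norm_num) (x := lo + hi) (y := hi)
      omega
    omega
  · have h2 : lo ≤ (lo + hi) / 2 := by
      have := Nat.le_div_iff_mul_le (k := 2) (by norm_num) (x := lo) (y := lo + hi)
      omega
    have h1 : (lo + hi) / 2 < hi := by
      have := Nat.div_lt_iff_lt_mul (k := 2) (by norm_num) (x := lo + hi) (y := hi)
      omega
    omega

def countBelow (pred : Int → Bool) (s : List Int) : Nat :=
  countBelowGo pred s 0 s.length

def ismed_alt (n : Int) (a : List Int) : Bool :=
  let s := PySem.List.sorted a (fun x => x) false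
  let below := countBelow (fun x => decide (x < n)) s
  let notAbove := countBelow (fun x => decide (x ≤ n)) s
  decide ((below : Int) = (s.length : Int) - (notAbove : Int))

-- ===== PRECONDITION & SPEC =====
def Spec_ismed (n : Int) (a : List Int) (out : Bool) : Prop := out = ismed_alt n a
instance (n : Int) (a : List Int) (out : Bool) : Decidable (Spec_ismed n a out) := by unfold Spec_ismed; infer_instance

-- ===== CLAIM (what is proved, stated in full; the proofs are below) =====
def Claim_equal_ismed : Prop := ∀ (n : Int) (a : List Int), Dom_ismed n a → Spec_ismed n a (ismed n a)

-- ===== LEMMAS AND PROOFS =====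

-- A's fold counts elements below and above n.
lemma ismed_fold (n : Int) (a : List Int) (c1 c2 : Int) :
    a.foldl (fun (st : Int × Int) i =>
      let st1 := if i < n then (st.1 + 1, st.2) else st
      if i > n then (st1.1, st1.2 + 1) else st1) (c1, c2)
      = (c1 + (a.countP (fun i => decide (i < n)) : Int),
         c2 + (a.countP (fun i => decide (n < i)) : Int)) := by
  induction a generalizing c1 c2 with
  | nil => simp
  | cons x xs ih =>
      simp only [List.foldl_cons, List.countP_cons]
      by_cases h1 : x < n <;> by_cases h2 : n < x <;>
        simp [h1, h2, ih] <;> ring_nf <;> omega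

-- a prefix-closed predicate's count equals the split point
lemma countP_of_threshold (s : List Int) (p : Int → Bool) (r : Nat) (hr : r ≤ s.length)
    (h1 : ∀ (j : Nat) (hj : j < s.length), j < r → p s[j] = true)
    (h2 : ∀ (j : Nat) (hj : j < s.length), r ≤ j → p s[j] = false) :
    s.countP p = r := by
  have hsplit : s = s.take r ++ s.drop r := (List.take_append_drop r s).symm
  have hlen : (s.take r).length = r := by simp [Nat.min_eq_left hr]
  have ht : (s.take r).countP p = r := by
    rw [List.countP_eq_length.mpr, hlen]
    intro x hx
    obtain ⟨i, hi, hix⟩ := List.mem_iff_getElem.mp hx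
    have : (s.take r)[i] = s[i]'(by omega) := List.getElem_take
    exact hix ▸ this ▸ h1 i (by omega) (by omega)
  have hd : (s.drop r).countP p = 0 := by
    rw [List.countP_eq_zero]
    intro x hx
    obtain ⟨i, hi, hix⟩ := List.mem_iff_getElem.mp hx
    have hlen2 : (s.drop r).length = s.length - r := by simp
    have : (s.drop r)[i] = s[r + i]'(by omega) := List.getElem_drop
    simpa [← hix, this] using h2 (r + i) (by omega) (by omega)
  conv_lhs => rw [hsplit]
  rw [List.countP_append, ht, hd]
  omega

-- binary-search invariant: countBelowGo finds the split point of a prefix-closed predicate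
lemma countBelowGo_eq (p : Int → Bool) (s : List Int)
    (hmono : ∀ (i j : Nat) (hi : i < s.length) (hj : j < s.length), i ≤ j → p s[j] = true → p s[i] = true) :
    ∀ (lo hi : Nat), lo ≤ hi → hi ≤ s.length →
    (∀ (j : Nat) (hj : j < s.length), j < lo → p s[j] = true) →
    (∀ (j : Nat) (hj : j < s.length), hi ≤ j → p s[j] = false) →
    countBelowGo p s lo hi = s.countP p := by
  intro lo hi
  induction lo, hi using countBelowGo.induct (pred := p) (s := s) with
  | case1 lo hi h mid hp ih =>
      intro hle hlen hlo hhi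
      have hmidlt : mid < hi := by
        have := Nat.div_lt_iff_lt_mul (k := 2) (by norm_num) (x := lo + hi) (y := hi); simp only [mid]; omega
      have hmidge : lo ≤ mid := by
        have := Nat.le_div_iff_mul_le (k := 2) (by norm_num) (x := lo) (y := lo + hi); simp only [mid]; omega
      have hmids : mid < s.length := by omega
      have hpm : p (s[mid]'hmids) = true := by
        rw [List.getD_eq_getElem?_getD, List.getElem?_eq_getElem hmids] at hp; exact hp
      rw [countBelowGo, dif_pos h, if_pos hp]
      exact ih (by omega) hlen
        (fun j hj hjlt => hmono j mid hj hmids (by omega) hpm)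
        hhi
  | case2 lo hi h mid hp ih =>
      intro hle hlen hlo hhi
      have hmidlt : mid < hi := by
        have := Nat.div_lt_iff_lt_mul (k := 2) (by norm_num) (x := lo + hi) (y := hi); simp only [mid]; omega
      have hmidge : lo ≤ mid := by
        have := Nat.le_div_iff_mul_le (k := 2) (by norm_num) (x := lo) (y := lo + hi); simp only [mid]; omega
      have hmids : mid < s.length := by omega
      have hpm : p (s[mid]'hmids) = false := by
        rw [List.getD_eq_getElem?_getD, List.getElem?_eq_getElem hmids] at hp
        simpa using hp
      rw [countBelowGo, dif_pos h, if_neg hp]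
      refine ih (by omega) (by omega) hlo ?_
      intro j hj hjge
      by_contra hc
      have hpj : p s[j] = true := by
        cases hpt : p s[j] with
        | false => exact absurd hpt hc
        | true => rfl
      exact absurd (hmono mid j hmids hj (by omega) hpj) (by simp [hpm])
  | case3 lo hi h =>
      intro hle hlen hlo hhi
      have : lo = hi := by omega
      rw [countBelowGo, dif_neg h]
      exact (countP_of_threshold s p lo (by omega) hlo (fun j hj hge => hhi j hj (by omega))).symm

lemma countBelow_eq (p : Int → Bool) (s : List Int)
    (hmono : ∀ (i j : Nat) (hi : i < s.length) (hj : j < s.length), i ≤ j → p s[j] = true → p s[i] = true) :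
    countBelow p s = s.countP p := by
  unfold countBelow
  exact countBelowGo_eq p s hmono 0 s.length (by omega) le_rfl
    (by intro j hj h; omega) (by intro j hj h; omega)

-- ===== VERDICT (by name: the statement is the Claim_ definition above) =====

theorem ismed_spec : Claim_equal_ismed := by
  unfold Claim_equal_ismed
  intro n a _
  unfold Spec_ismed ismed ismed_alt
  set s := PySem.List.sorted a (fun x => x) false with hs
  have hperm : s.Perm a := PySem.List.sorted_perm a (fun x => x) false
  have hpw : s.Pairwise (· ≤ ·) := by
    simpa using PySem.List.sorted_pairwise (xs := a) (key := fun x => x)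
  have hget : ∀ (i j : Nat) (hi : i < s.length) (hj : j < s.length), i ≤ j → s[i] ≤ s[j] := by
    intro i j hi hj hij
    rcases Nat.lt_or_ge i j with h | h
    · exact (List.pairwise_iff_getElem.mp hpw) i j hi hj h
    · have : i = j := by omega
      subst this; exact le_rfl
  have hlt : countBelow (fun x => decide (x < n)) s = s.countP (fun x => decide (x < n)) := by
    refine countBelow_eq _ s ?_
    intro i j hi hj hij hp
    have := hget i j hi hj hij
    simp at hp ⊢; omega
  have hle : countBelow (fun x => decide (x ≤ n)) s = s.countP (fun x => decide (x ≤ n)) := by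
    refine countBelow_eq _ s ?_
    intro i j hi hj hij hp
    have := hget i j hi hj hij
    simp at hp ⊢; omega
  have hfold := ismed_fold n a 0 0
  have hcompl : s.countP (fun x => decide (x ≤ n)) + s.countP (fun x => decide (n < x)) = s.length := by
    have := List.length_eq_countP_add_countP (p := fun x => decide (x ≤ n)) (l := s)
    rw [this]
    congr 1
    apply List.countP_congr
    intro x _
    simp [not_le]
  have hpa1 : s.countP (fun x => decide (x < n)) = a.countP (fun x => decide (x < n)) :=
    hperm.countP_eq _
  have hpa2 : s.countP (fun x => decide (n < x)) = a.countP (fun x => decide (n < x)) :=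
    hperm.countP_eq _
  have hpa3 : s.length = a.length := hperm.length_eq
  simp only [hfold, hlt, hle, zero_add, gt_iff_lt]
  rcases Nat.decEq (a.countP (fun i => decide (i < n))) (a.countP (fun i => decide (n < i))) with h | h
  · rw [if_neg (by exact_mod_cast h)]
    symm
    simp only [decide_eq_false_iff_not]
    intro hc
    apply h
    have : (s.countP (fun x => decide (x < n)) : Int)
        = s.length - (s.countP (fun x => decide (x ≤ n)) : Int) := hc
    omega
  · rw [if_pos (by exact_mod_cast h)]
    symm
    simp only [decide_eq_true_eq]
    have : s.countP (fun x => decide (x < n)) = s.countP (fun x => decide (n < x)) := by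
      rw [hpa1, hpa2]; exact h
    omega
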